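-- pv_equiv track=rewrite | github.com/mochilang/mochi | tests/leetcode/x/python/0514.py | solve
-- ===== SOURCE A (Python) =====
-- def solve(ring: str, key: str) -> int:
--     n = len(ring)
--     positions: dict[str, list[int]] = {}
--     for i, ch in enumerate(ring):
--         positions.setdefault(ch, []).append(i)
--     dp = {0: 0}
--     for ch in key:
--         nxt: dict[int, int] = {}
--         for j in positions[ch]:
--             best = 10**18
--             for i, cost in dp.items():
--                 diff = abs(i - j)
--                 step = min(diff, n - diff)
--                 cand = cost + step
--                 if cand < best:
--                     best = cand
--             nxt[j] = best
--         dp = nxt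
--     return min(dp.values()) + len(key)
-- ===== SOURCE B (Python) =====
-- def solve(ring: str, key: str) -> int:
--     n = len(ring)
--     positions: dict[str, list[int]] = {}
--     for i, ch in enumerate(ring):
--         positions.setdefault(ch, []).append(i)
--     memo: dict[tuple[int, int], int] = {}
--
--     def dp(k: int, pos: int) -> int:
--         if k == len(key):
--             return 0
--         if (k, pos) in memo:
--             return memo[(k, pos)]
--         best = 10**18
--         for j in positions[key[k]]:
--             diff = abs(pos - j)
--             cand = min(diff, n - diff) + dp(k + 1, j)
--             if cand < best:
--                 best = cand
--         memo[(k, pos)] = best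
--         return best
--
--     return dp(0, 0) + len(key)
-- ===== Notes on version B (the rewrite author's own statement) =====
-- stated objective: alternative
-- what changed: A's bottom-up forward DP that rebuilds a dict of reachable ring positions with cost-so-far for each key character is replaced by top-down memoized recursion dp(k, pos) computing the cost-to-finish of the key suffix, over the same char-to-positions index.
import Mathlib
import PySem

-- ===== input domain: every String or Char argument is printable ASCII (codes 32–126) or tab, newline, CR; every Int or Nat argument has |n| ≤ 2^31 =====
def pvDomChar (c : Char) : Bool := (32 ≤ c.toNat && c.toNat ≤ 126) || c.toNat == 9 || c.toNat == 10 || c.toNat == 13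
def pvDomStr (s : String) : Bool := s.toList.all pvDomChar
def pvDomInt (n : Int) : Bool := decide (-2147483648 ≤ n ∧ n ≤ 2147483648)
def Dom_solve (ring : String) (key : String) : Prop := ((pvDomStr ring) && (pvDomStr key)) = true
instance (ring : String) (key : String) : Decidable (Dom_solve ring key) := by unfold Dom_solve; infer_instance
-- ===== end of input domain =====

-- B replaces A's forward dict DP over key prefixes by top-down memoized recursion over
-- (suffix, ring position) — an alternative decomposition of the same cost (objective: alternative).

-- ===== PORT A =====
-- 'min(dp.values())' raises ValueError on an empty dict and 'positions[ch]' raises KeyError for a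
-- key char absent from ring; both are unreachable under Pre_solve (the .getD 0 is a placeholder).
def solve (ring : String) (key : String) : Int :=
  let n : Int := PySem.Str.len ring
  let positions : PySem.Dict Char (List Int) :=
    (PySem.List.enumerate ring.toList).foldl
      (fun d p => d.modify p.2 [] (fun l => l ++ [p.1])) PySem.Dict.empty
  let final : PySem.Dict Int Int :=
    key.toList.foldl (fun dp ch =>
      (positions.getD ch []).foldl (fun nxt j =>
        let best := dp.items.foldl (fun best ic =>
          let diff := |ic.1 - j|
          let step := min diff (n - diff)
          let cand := ic.2 + step
          if cand < best then cand else best) (10 ^ 18)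
        nxt.insert j best) PySem.Dict.empty) (PySem.Dict.ofList [(0, 0)])
  ((PySem.List.min? final.values (fun y => y)).getD 0) + PySem.Str.len key

-- ===== PORT B =====
-- The memo cache is threaded explicitly; it is keyed by (length of the remaining key suffix, pos),
-- in bijection with Source B's (k, pos).
mutual
def bDp (n : Int) (P : PySem.Dict Char (List Int)) (s : List Char) (pos : Int)
    (memo : PySem.Dict (Nat × Int) Int) : Int × PySem.Dict (Nat × Int) Int :=
  match s with
  | [] => (0, memo)
  | c :: rest =>
    match memo.get? (rest.length + 1, pos) with
    | some v => (v, memo)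
    | none =>
      let r := bLoop n P rest pos (P.getD c []) (10 ^ 18) memo
      (r.1, r.2.insert (rest.length + 1, pos) r.1)
termination_by (s.length, 0)

def bLoop (n : Int) (P : PySem.Dict Char (List Int)) (rest : List Char) (pos : Int)
    (js : List Int) (best : Int) (memo : PySem.Dict (Nat × Int) Int) :
    Int × PySem.Dict (Nat × Int) Int :=
  match js with
  | [] => (best, memo)
  | j :: js' =>
    let rv := bDp n P rest j memo
    let diff := |pos - j|
    let cand := min diff (n - diff) + rv.1
    bLoop n P rest pos js' (if cand < best then cand else best) rv.2
termination_by (rest.length, js.length + 1)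
end

def solve_alt (ring : String) (key : String) : Int :=
  let n : Int := PySem.Str.len ring
  let positions : PySem.Dict Char (List Int) :=
    (PySem.List.enumerate ring.toList).foldl
      (fun d p => d.modify p.2 [] (fun l => l ++ [p.1])) PySem.Dict.empty
  (bDp n positions key.toList 0 PySem.Dict.empty).1 + PySem.Str.len key

-- ===== PRECONDITION & SPEC =====
-- Pre_solve excludes exactly the inputs where A raises (KeyError on positions[ch] for a key
-- character that does not occur in ring); B raises there too.
def Pre_solve (ring : String) (key : String) : Prop :=
  key.toList.all (fun c => ring.toList.contains c) = true
instance (ring : String) (key : String) : Decidable (Pre_solve ring key) := by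
  unfold Pre_solve; infer_instance
def pvWitness_solve : String × String := ("ab", "b")

def Spec_solve (ring : String) (key : String) (out : Int) : Prop := out = solve_alt ring key
instance (ring : String) (key : String) (out : Int) : Decidable (Spec_solve ring key out) := by
  unfold Spec_solve; infer_instance

-- ===== CLAIM (what is proved, stated in full; the proofs are below) =====
def Claim_equal_solve : Prop := ∀ (ring : String) (key : String), Dom_solve ring key → Pre_solve ring key → Spec_solve ring key (solve ring key)

-- ===== LEMMAS AND PROOFS =====

-- big sentinel 10**18
def pvBig : Int := 10 ^ 18

def pvStep (n i j : Int) : Int := min |i - j| (n - |i - j|)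

def pvMinS (xs : List Int) : Int := xs.foldl min pvBig

theorem pv_if_min (a b : Int) : (if b < a then b else a) = min a b := by
  simp only [min_def]; split_ifs <;> omega

theorem pv_foldl_min_min (xs : List Int) : ∀ (a b : Int),
    xs.foldl min (min a b) = min a (xs.foldl min b) := by
  induction xs with
  | nil => intro a b; rfl
  | cons x t ih =>
    intro a b
    simp only [List.foldl_cons]
    rw [min_assoc, ih]

theorem pvMinS_le : pvMinS xs ≤ pvBig := (PySem.List.foldl_min_le xs pvBig).1

theorem pv_foldl_min_eq (xs : List Int) (a : Int) (h : a ≤ pvBig) :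
    xs.foldl min a = min a (pvMinS xs) :=
  calc xs.foldl min a = xs.foldl min (min a pvBig) := by rw [min_eq_left h]
    _ = min a (xs.foldl min pvBig) := pv_foldl_min_min xs a pvBig
    _ = min a (pvMinS xs) := rfl

theorem pvMinS_nonneg (xs : List Int) (h : ∀ x ∈ xs, 0 ≤ x) : 0 ≤ pvMinS xs := by
  have aux : ∀ (l : List Int) (a : Int), 0 ≤ a → (∀ x ∈ l, 0 ≤ x) → 0 ≤ l.foldl min a := by
    intro l
    induction l with
    | nil => intro a ha _; exact ha
    | cons x t ih =>
      intro a ha h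
      simp only [List.foldl_cons]
      exact ih _ (le_min ha (h x (by simp))) (fun y hy => h y (by simp [hy]))
  exact aux xs pvBig (by norm_num [pvBig]) h

theorem pvMinS_congr {α : Type} (xs : List α) (f g : α → Int)
    (h : ∀ x ∈ xs, min pvBig (f x) = min pvBig (g x)) :
    pvMinS (xs.map f) = pvMinS (xs.map g) := by
  have aux : ∀ (l : List α) (a : Int), (∀ x ∈ l, min pvBig (f x) = min pvBig (g x)) →
      l.foldl (fun b x => min b (f x)) (min pvBig a) = l.foldl (fun b x => min b (g x)) (min pvBig a) := by
    intro l
    induction l with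
    | nil => intro a _; rfl
    | cons x t ih =>
      intro a h
      simp only [List.foldl_cons]
      have hx := h x (by simp)
      have e1 : min (min pvBig a) (f x) = min pvBig (min a (f x)) := by
        simp only [min_def]; split_ifs <;> omega
      have e2 : min (min pvBig a) (g x) = min pvBig (min a (g x)) := by
        simp only [min_def]; split_ifs <;> omega
      have e3 : min pvBig (min a (f x)) = min pvBig (min a (g x)) := by
        simp only [min_def] at hx ⊢; split_ifs at hx ⊢ <;> omega
      rw [e1, e3, e2]
      exact ih _ (fun y hy => h y (by simp [hy]))
  have := aux xs pvBig (fun x hx => h x hx)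
  simpa [List.foldl_map, min_self, pvMinS] using this

theorem pv_minS_add_aux (xs : List Int) : ∀ (a e : Int),
    min pvBig (xs.foldl min a + e) = xs.foldl (fun b y => min b (y + e)) (min pvBig (a + e)) := by
  induction xs with
  | nil => intro a e; rfl
  | cons x t ih =>
    intro a e
    simp only [List.foldl_cons]
    rw [ih (min a x) e]
    congr 1
    simp only [min_def]; split_ifs <;> omega

theorem pvMinS_map_add (xs : List Int) (e : Int) (he : 0 ≤ e) :
    min pvBig (pvMinS xs + e) = pvMinS (xs.map (fun y => y + e)) := by
  have := pv_minS_add_aux xs pvBig e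
  rw [pvMinS, this]
  have h0 : min pvBig (pvBig + e) = pvBig := min_eq_left (by omega)
  rw [h0, pvMinS, List.foldl_map]

theorem pvMinS_add_left (xs : List Int) (c : Int) (hc : 0 ≤ c) :
    min pvBig (c + pvMinS xs) = pvMinS (xs.map (fun y => c + y)) := by
  rw [add_comm c (pvMinS xs), pvMinS_map_add xs c hc]
  congr 1
  exact List.map_congr_left (fun y _ => by ring)

theorem pv_flatMap_minS {α : Type} (l : List α) (f : α → List Int) :
    pvMinS (l.flatMap f) = pvMinS (l.map (fun x => pvMinS (f x))) := by
  have aux : ∀ (t : List α) (a : Int), a ≤ pvBig →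
      (t.flatMap f).foldl min a = t.foldl (fun b x => min b (pvMinS (f x))) a := by
    intro t
    induction t with
    | nil => intro a _; rfl
    | cons x rest ih =>
      intro a ha
      simp only [List.flatMap_cons, List.foldl_append, List.foldl_cons]
      rw [pv_foldl_min_eq (f x) a ha, ih _ (le_trans (min_le_left _ _) ha)]
  rw [pvMinS, aux l pvBig le_rfl, pvMinS, List.foldl_map]

theorem pv_perm_flatMap_cons {α β : Type} (L : List α) (f : α → β) (g : α → List β) :
    (L.flatMap (fun x => f x :: g x)).Perm (L.map f ++ L.flatMap g) := by
  induction L with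
  | nil => simp
  | cons x t ih =>
    simp only [List.flatMap_cons, List.map_cons, List.cons_append]
    refine List.Perm.cons (f x) ?_
    have h2 : (g x ++ (t.map f ++ t.flatMap g)).Perm (t.map f ++ (g x ++ t.flatMap g)) := by
      rw [← List.append_assoc, ← List.append_assoc]
      exact List.Perm.append_right _ List.perm_append_comm
    exact (List.Perm.append_left _ ih).trans h2

theorem pv_transpose {α β : Type} (I : List α) (J : List β) (w : α → β → Int) :
    (J.flatMap (fun j => I.map (fun p => w p j))).Perm (I.flatMap (fun p => J.map (fun j => w p j))) := by
  induction J with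
  | nil => simp
  | cons j J' ih =>
    simp only [List.flatMap_cons, List.map_cons]
    have h1 := pv_perm_flatMap_cons I (fun p => w p j) (fun p => J'.map (fun j' => w p j'))
    exact (List.Perm.append_left _ ih).trans h1.symm

theorem pvMinS_perm (xs ys : List Int) (h : xs.Perm ys) : pvMinS xs = pvMinS ys := by
  letI : RightCommutative (fun (b : Int) (a : Int) => min b a) := ⟨fun b a a' => by
    rw [min_assoc, min_comm a a', ← min_assoc]⟩
  exact h.foldl_eq pvBig

theorem pv_exchange (I : List (Int × Int)) (J : List Int) (C : Int → Int → Int) (F : Int → Int)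
    (hc : ∀ p ∈ I, 0 ≤ p.2) (hF : ∀ j ∈ J, 0 ≤ F j) :
    pvMinS (J.map (fun j => pvMinS (I.map (fun p => p.2 + C p.1 j)) + F j))
      = pvMinS (I.map (fun p => p.2 + pvMinS (J.map (fun j => C p.1 j + F j)))) := by
  have step1 : pvMinS (J.map (fun j => pvMinS (I.map (fun p => p.2 + C p.1 j)) + F j))
      = pvMinS (J.map (fun j => pvMinS (I.map (fun p => p.2 + C p.1 j + F j)))) := by
    apply pvMinS_congr
    intro j hj
    rw [pvMinS_map_add _ (F j) (hF j hj), min_eq_right pvMinS_le, List.map_map]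
    rfl
  have step2 : pvMinS (I.map (fun p => p.2 + pvMinS (J.map (fun j => C p.1 j + F j))))
      = pvMinS (I.map (fun p => pvMinS (J.map (fun j => p.2 + C p.1 j + F j)))) := by
    apply pvMinS_congr
    intro p hp
    rw [pvMinS_add_left _ p.2 (hc p hp), min_eq_right pvMinS_le, List.map_map]
    congr 1
    exact List.map_congr_left (fun j _ => by simp; ring)
  rw [step1, step2]
  rw [← pv_flatMap_minS, ← pv_flatMap_minS]
  exact pvMinS_perm _ _ (pv_transpose I J (fun p j => p.2 + C p.1 j + F j))

-- cost-to-finish of a key suffix from ring position pos (the common mathematical form)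
def pvF (n : Int) (P : Char → List Int) : List Char → Int → Int
  | [], _ => 0
  | c :: rest, pos =>
    (P c).foldl (fun b j => min b (pvStep n pos j + pvF n P rest j)) pvBig

theorem pvF_cons (n : Int) (P : Char → List Int) (c : Char) (rest : List Char) (pos : Int) :
    pvF n P (c :: rest) pos = pvMinS ((P c).map (fun j => pvStep n pos j + pvF n P rest j)) := by
  rw [pvF, pvMinS, List.foldl_map]

theorem pvStep_nonneg (n i j : Int) (hi0 : 0 ≤ i) (hin : i ≤ n) (hj0 : 0 ≤ j) (hjn : j ≤ n) :
    0 ≤ pvStep n i j := by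
  rw [pvStep, le_min_iff]
  constructor
  · exact abs_nonneg _
  · have : |i - j| ≤ n := abs_le.mpr ⟨by omega, by omega⟩
    omega

theorem pvF_le (n : Int) (P : Char → List Int) (s : List Char) (pos : Int) :
    pvF n P s pos ≤ pvBig := by
  cases s with
  | nil => norm_num [pvF, pvBig]
  | cons c rest => rw [pvF_cons]; exact pvMinS_le

theorem pvF_nonneg (n : Int) (P : Char → List Int)
    (hP : ∀ c, ∀ j ∈ P c, 0 ≤ j ∧ j < n) :
    ∀ (s : List Char) (pos : Int), 0 ≤ pos → pos ≤ n → 0 ≤ pvF n P s pos := by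
  intro s
  induction s with
  | nil => intro pos _ _; simp [pvF]
  | cons c rest ih =>
    intro pos h0 hn
    rw [pvF_cons]
    apply pvMinS_nonneg
    intro x hx
    simp only [List.mem_map] at hx
    obtain ⟨j, hj, rfl⟩ := hx
    have hjb := hP c j hj
    have h1 := pvStep_nonneg n pos j h0 hn hjb.1 (le_of_lt hjb.2)
    have h2 := ih j hjb.1 (le_of_lt hjb.2)
    omega

-- the char→positions index both ports build
def pvIdx (ring : String) : PySem.Dict Char (List Int) :=
  (PySem.List.enumerate ring.toList).foldl
    (fun d p => d.modify p.2 [] (fun l => l ++ [p.1])) PySem.Dict.empty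

def pvP (ring : String) (c : Char) : List Int := (pvIdx ring).getD c []

theorem pvIdx_getD_aux (c : Char) : ∀ (l : List (Int × Char)) (d : PySem.Dict Char (List Int)),
    (l.foldl (fun d p => d.modify p.2 [] (fun t => t ++ [p.1])) d).getD c []
      = d.getD c [] ++ (l.filter (fun p => p.2 == c)).map (·.1) := by
  intro l
  induction l with
  | nil => intro d; simp
  | cons p rest ih =>
    intro d
    simp only [List.foldl_cons, List.filter_cons]
    rw [ih]
    by_cases hc : p.2 = c
    · subst hc
      rw [PySem.Dict.getD_modify]
      simp
    · rw [PySem.Dict.getD_modify]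
      simp [hc, Ne.symm hc]

theorem pvP_eq (ring : String) (c : Char) :
    pvP ring c = ((PySem.List.enumerate ring.toList 0).filter (fun p => p.2 == c)).map (·.1) := by
  rw [pvP, pvIdx, pvIdx_getD_aux]
  simp

theorem pvP_bounds (ring : String) (c : Char) :
    ∀ j ∈ pvP ring c, 0 ≤ j ∧ j < (ring.toList.length : Int) := by
  intro j hj
  rw [pvP_eq] at hj
  simp only [List.mem_map, List.mem_filter] at hj
  obtain ⟨p, ⟨hp, _⟩, rfl⟩ := hj
  rw [PySem.List.mem_enumerate_iff] at hp
  obtain ⟨k, hk, rfl⟩ := hp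
  simp only [zero_add]
  exact ⟨Int.natCast_nonneg k, by exact_mod_cast hk⟩

theorem pvP_nodup (ring : String) (c : Char) : (pvP ring c).Nodup := by
  rw [pvP_eq]
  have h1 := PySem.List.pairwise_lt_enumerate ring.toList 0
  have h2 : (List.filter (fun p => p.2 == c) (PySem.List.enumerate ring.toList 0)).Pairwise
      (fun p q => p.1 < q.1) := List.Pairwise.sublist List.filter_sublist h1
  have h3 := List.Pairwise.map (fun (p : Int × Char) => p.1)
    (S := fun a b => a < b) (fun a b h => h) h2
  exact h3.imp (fun h => ne_of_lt h)

theorem pvP_nonempty (ring : String) (c : Char) (h : c ∈ ring.toList) : pvP ring c ≠ [] := by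
  rw [pvP_eq]
  obtain ⟨k, hk, rfl⟩ := List.mem_iff_getElem.mp h
  have : ((0 : Int) + k, ring.toList[k]) ∈ (PySem.List.enumerate ring.toList 0).filter
      (fun p => p.2 == ring.toList[k]) := by
    rw [List.mem_filter]
    refine ⟨(PySem.List.mem_enumerate_iff _ _ _).mpr ⟨k, hk, rfl⟩, by simp⟩
  intro hemp
  rw [List.map_eq_nil_iff] at hemp
  rw [hemp] at this
  exact (List.not_mem_nil) this

-- A's per-key-character dict transformer (the body of solve's outer fold)
def pvAbody (n : Int) (positions : PySem.Dict Char (List Int))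
    (dp : PySem.Dict Int Int) (ch : Char) : PySem.Dict Int Int :=
  (positions.getD ch []).foldl (fun nxt j =>
    let best := dp.items.foldl (fun best ic =>
      let diff := |ic.1 - j|
      let step := min diff (n - diff)
      let cand := ic.2 + step
      if cand < best then cand else best) (10 ^ 18)
    nxt.insert j best) PySem.Dict.empty

def pvBest (n : Int) (dp : PySem.Dict Int Int) (j : Int) : Int :=
  pvMinS (dp.items.map (fun p => p.2 + pvStep n p.1 j))

theorem pvBest_eq (n : Int) (dp : PySem.Dict Int Int) (j : Int) :
    (dp.items.foldl (fun best ic =>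
      let diff := |ic.1 - j|
      let step := min diff (n - diff)
      let cand := ic.2 + step
      if cand < best then cand else best) (10 ^ 18)) = pvBest n dp j := by
  rw [pvBest, pvMinS, List.foldl_map]
  have : ∀ (l : List (Int × Int)) (a : Int),
      l.foldl (fun best ic =>
        let diff := |ic.1 - j|
        let step := min diff (n - diff)
        let cand := ic.2 + step
        if cand < best then cand else best) a
      = l.foldl (fun b p => min b (p.2 + pvStep n p.1 j)) a := by
    intro l
    induction l with
    | nil => intro a; rfl
    | cons p t ih =>
      intro a
      simp only [List.foldl_cons]
      rw [ih]
      congr 1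
      rw [pv_if_min, pvStep]
  exact this dp.items pvBig

theorem pvAbody_items (n : Int) (positions : PySem.Dict Char (List Int))
    (dp : PySem.Dict Int Int) (ch : Char) (hnd : (positions.getD ch []).Nodup) :
    (pvAbody n positions dp ch).items
      = (positions.getD ch []).map (fun j => (j, pvBest n dp j)) := by
  rw [pvAbody]
  simp only [pvBest_eq]
  have := PySem.Dict.items_foldl_insert_fresh (positions.getD ch []) (fun j => j)
    (fun j => pvBest n dp j) PySem.Dict.empty
    (fun a _ => PySem.Dict.contains_empty a) (by simpa using hnd)
  simpa using this

theorem pv_mainA (n : Int) (positions : PySem.Dict Char (List Int))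
    (hPb : ∀ c, ∀ j ∈ positions.getD c [], 0 ≤ j ∧ j < n)
    (hPn : ∀ c, (positions.getD c []).Nodup) :
    ∀ (s : List Char) (dp : PySem.Dict Int Int),
    (∀ p ∈ dp.items, 0 ≤ p.2 ∧ 0 ≤ p.1 ∧ p.1 ≤ n) →
    pvMinS ((s.foldl (pvAbody n positions) dp).items.map (fun p => p.2))
      = pvMinS (dp.items.map (fun p =>
          p.2 + pvF n (fun c => positions.getD c []) s p.1)) := by
  intro s
  induction s with
  | nil =>
    intro dp _
    simp only [List.foldl_nil, pvF]
    congr 1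
    exact (List.map_congr_left (fun p _ => by omega)).symm
  | cons c s' ih =>
    intro dp hdp
    simp only [List.foldl_cons]
    have hstep : ∀ p ∈ dp.items, ∀ j ∈ positions.getD c [], 0 ≤ pvStep n p.1 j := by
      intro p hp j hj
      obtain ⟨h1, h2, h3⟩ := hdp p hp
      obtain ⟨h4, h5⟩ := hPb c j hj
      exact pvStep_nonneg n p.1 j h2 h3 h4 (le_of_lt h5)
    have hdp' : ∀ p ∈ (pvAbody n positions dp c).items, 0 ≤ p.2 ∧ 0 ≤ p.1 ∧ p.1 ≤ n := by
      intro p hp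
      rw [pvAbody_items n positions dp c (hPn c)] at hp
      simp only [List.mem_map] at hp
      obtain ⟨j, hj, rfl⟩ := hp
      obtain ⟨h4, h5⟩ := hPb c j hj
      refine ⟨?_, h4, le_of_lt h5⟩
      apply pvMinS_nonneg
      intro x hx
      simp only [List.mem_map] at hx
      obtain ⟨p, hp, rfl⟩ := hx
      have := hstep p hp j hj
      have := (hdp p hp).1
      omega
    rw [ih (pvAbody n positions dp c) hdp']
    rw [pvAbody_items n positions dp c (hPn c), List.map_map]
    have hF : ∀ j ∈ positions.getD c [], 0 ≤ pvF n (fun c => positions.getD c []) s' j := by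
      intro j hj
      obtain ⟨h4, h5⟩ := hPb c j hj
      exact pvF_nonneg n _ hPb s' j h4 (le_of_lt h5)
    have hexch := pv_exchange dp.items (positions.getD c []) (pvStep n)
      (pvF n (fun c => positions.getD c []) s')
      (fun p hp => (hdp p hp).1) hF
    rw [show ((fun (p : Int × Int) => p.2 + pvF n (fun c => positions.getD c []) s' p.1) ∘ (fun j => (j, pvBest n dp j)))
        = (fun j => pvMinS (dp.items.map (fun p => p.2 + pvStep n p.1 j)) + pvF n (fun c => positions.getD c []) s' j) from rfl]
    rw [hexch]
    congr 1
    apply List.map_congr_left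
    intro p _
    rw [pvF_cons]

theorem pvA_ne (n : Int) (positions : PySem.Dict Char (List Int))
    (hPn : ∀ c, (positions.getD c []).Nodup) :
    ∀ (s : List Char) (dp : PySem.Dict Int Int), dp.items ≠ [] →
    (∀ c ∈ s, positions.getD c [] ≠ []) →
    (s.foldl (pvAbody n positions) dp).items ≠ [] := by
  intro s
  induction s with
  | nil => intro dp h _; exact h
  | cons c s' ih =>
    intro dp _ hne
    simp only [List.foldl_cons]
    apply ih
    · rw [pvAbody_items n positions dp c (hPn c)]
      simp only [ne_eq, List.map_eq_nil_iff]
      exact hne c (by simp)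
    · intro c' hc'; exact hne c' (by simp [hc'])

theorem pvA_le (n : Int) (positions : PySem.Dict Char (List Int))
    (hPn : ∀ c, (positions.getD c []).Nodup) :
    ∀ (s : List Char) (dp : PySem.Dict Int Int),
    (∀ p ∈ dp.items, p.2 ≤ pvBig) →
    ∀ p ∈ (s.foldl (pvAbody n positions) dp).items, p.2 ≤ pvBig := by
  intro s
  induction s with
  | nil => intro dp h; exact h
  | cons c s' ih =>
    intro dp _
    simp only [List.foldl_cons]
    apply ih
    intro p hp
    rw [pvAbody_items n positions dp c (hPn c)] at hp
    simp only [List.mem_map] at hp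
    obtain ⟨j, _, rfl⟩ := hp
    exact pvMinS_le

theorem pv_minq_eq (l : List Int) (hne : l ≠ []) (hle : ∀ x ∈ l, x ≤ pvBig) :
    (PySem.List.min? l (fun y => y)).getD 0 = pvMinS l := by
  cases l with
  | nil => exact absurd rfl hne
  | cons x t =>
    rw [PySem.List.min?_id_cons]
    have : pvMinS (x :: t) = t.foldl min (min pvBig x) := rfl
    rw [this, min_eq_right (hle x (by simp))]
    rfl

theorem pv_solveA_eq (ring key : String) (hpre : ∀ c ∈ key.toList, c ∈ ring.toList) :
    solve ring key
      = pvF (PySem.Str.len ring) (pvP ring) key.toList 0 + PySem.Str.len key := by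
  have hshape : solve ring key
      = ((PySem.List.min? ((key.toList.foldl (pvAbody (PySem.Str.len ring) (pvIdx ring))
          (PySem.Dict.ofList [(0, 0)])).values) (fun y => y)).getD 0) + PySem.Str.len key := rfl
  have hPb : ∀ c, ∀ j ∈ (pvIdx ring).getD c [], 0 ≤ j ∧ j < PySem.Str.len ring := by
    intro c j hj
    have := pvP_bounds ring c j hj
    rw [PySem.Str.len_eq]
    exact this
  have hPn : ∀ c, ((pvIdx ring).getD c []).Nodup := fun c => pvP_nodup ring c
  have hitems0 : (PySem.Dict.ofList ([(0, 0)] : List (Int × Int))).items = [(0, 0)] := rfl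
  have hdp0 : ∀ p ∈ (PySem.Dict.ofList ([(0, 0)] : List (Int × Int))).items,
      0 ≤ p.2 ∧ 0 ≤ p.1 ∧ p.1 ≤ PySem.Str.len ring := by
    rw [hitems0]
    intro p hp
    simp only [List.mem_singleton] at hp
    subst hp
    refine ⟨le_rfl, le_rfl, ?_⟩
    rw [PySem.Str.len_eq]
    exact Int.natCast_nonneg _
  have hmain := pv_mainA (PySem.Str.len ring) (pvIdx ring) hPb hPn key.toList
    (PySem.Dict.ofList [(0, 0)]) hdp0
  have hne := pvA_ne (PySem.Str.len ring) (pvIdx ring) hPn key.toList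
    (PySem.Dict.ofList [(0, 0)]) (by rw [hitems0]; simp)
    (fun c hc => pvP_nonempty ring c (hpre c hc))
  have hle := pvA_le (PySem.Str.len ring) (pvIdx ring) hPn key.toList
    (PySem.Dict.ofList [(0, 0)])
    (by rw [hitems0]; intro p hp; simp only [List.mem_singleton] at hp; subst hp
        norm_num [pvBig])
  rw [hshape]
  congr 1
  have hvals : (key.toList.foldl (pvAbody (PySem.Str.len ring) (pvIdx ring))
      (PySem.Dict.ofList [(0, 0)])).values
      = (key.toList.foldl (pvAbody (PySem.Str.len ring) (pvIdx ring))
      (PySem.Dict.ofList [(0, 0)])).items.map (fun p => p.2) := rfl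
  have harg : ∀ x ∈ (key.toList.foldl (pvAbody (PySem.Str.len ring) (pvIdx ring))
      (PySem.Dict.ofList [(0, 0)])).items.map (fun p => p.2), x ≤ pvBig := by
    intro x hx
    simp only [List.mem_map] at hx
    obtain ⟨p, hp, rfl⟩ := hx
    exact hle p hp
  rw [hvals, pv_minq_eq _ (by simpa using hne) harg]
  rw [hmain, hitems0]
  have : pvMinS [(0:Int) + pvF (PySem.Str.len ring) (pvP ring) key.toList 0]
      = min pvBig ((0:Int) + pvF (PySem.Str.len ring) (pvP ring) key.toList 0) := rfl
  rw [show (List.map (fun p => p.2 + pvF (PySem.Str.len ring) (fun c => (pvIdx ring).getD c []) key.toList p.1) [((0:Int), (0:Int))])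
      = [(0:Int) + pvF (PySem.Str.len ring) (pvP ring) key.toList 0] from rfl]
  rw [this, zero_add, min_eq_right (pvF_le _ _ _ _)]

-- a memo cache is valid if every entry (l, pos) ↦ v is pvF of the length-l suffix of K at pos
def pvValid (n : Int) (P : Char → List Int) (K : List Char)
    (m : PySem.Dict (Nat × Int) Int) : Prop :=
  ∀ a v, m.get? a = some v →
    ∃ s, s <:+ K ∧ s.length = a.1 ∧ v = pvF n P s a.2

theorem pv_suffix_eq_of_length {s1 s2 K : List Char} (h1 : s1 <:+ K) (h2 : s2 <:+ K)
    (h : s1.length = s2.length) : s1 = s2 := by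
  obtain ⟨t1, rfl⟩ := h1
  obtain ⟨t2, e⟩ := h2
  have hl : t2.length = t1.length := by
    have := congrArg List.length e
    simp only [List.length_append] at this
    omega
  exact (List.append_inj e hl).2.symm

theorem pv_bLoop_spec (n : Int) (positions : PySem.Dict Char (List Int)) (K : List Char)
    (rest : List Char)
    (hdp : ∀ (pos : Int) (m : PySem.Dict (Nat × Int) Int),
      pvValid n (fun c => positions.getD c []) K m →
      (bDp n positions rest pos m).1 = pvF n (fun c => positions.getD c []) rest pos ∧
        pvValid n (fun c => positions.getD c []) K (bDp n positions rest pos m).2) :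
    ∀ (js : List Int) (pos best : Int) (m : PySem.Dict (Nat × Int) Int),
      pvValid n (fun c => positions.getD c []) K m →
      (bLoop n positions rest pos js best m).1
          = js.foldl (fun b j => min b (pvStep n pos j + pvF n (fun c => positions.getD c []) rest j)) best ∧
        pvValid n (fun c => positions.getD c []) K (bLoop n positions rest pos js best m).2 := by
  intro js
  induction js with
  | nil =>
    intro pos best m hm
    have hB : bLoop n positions rest pos [] best m = (best, m) := by rw [bLoop]
    rw [hB]
    exact ⟨rfl, hm⟩
  | cons j js' ih =>
    intro pos best m hm
    obtain ⟨h1, h2⟩ := hdp j m hm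
    have hB : bLoop n positions rest pos (j :: js') best m
        = bLoop n positions rest pos js'
            (if min |pos - j| (n - |pos - j|) + (bDp n positions rest j m).1 < best
              then min |pos - j| (n - |pos - j|) + (bDp n positions rest j m).1 else best)
            (bDp n positions rest j m).2 := by rw [bLoop]
    rw [hB]
    obtain ⟨ih1, ih2⟩ := ih pos
      (if min |pos - j| (n - |pos - j|) + (bDp n positions rest j m).1 < best
        then min |pos - j| (n - |pos - j|) + (bDp n positions rest j m).1 else best)
      (bDp n positions rest j m).2 h2
    refine ⟨?_, ih2⟩
    rw [ih1, List.foldl_cons, h1, pv_if_min, pvStep]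

theorem pv_bDp_spec (n : Int) (positions : PySem.Dict Char (List Int)) (K : List Char) :
    ∀ (s : List Char), s <:+ K → ∀ (pos : Int) (m : PySem.Dict (Nat × Int) Int),
      pvValid n (fun c => positions.getD c []) K m →
      (bDp n positions s pos m).1 = pvF n (fun c => positions.getD c []) s pos ∧
        pvValid n (fun c => positions.getD c []) K (bDp n positions s pos m).2 := by
  intro s
  induction s with
  | nil =>
    intro _ pos m hm
    have hD : bDp n positions [] pos m = (0, m) := by rw [bDp]
    rw [hD]
    exact ⟨rfl, hm⟩
  | cons c rest ih =>
    intro hsuf pos m hm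
    have hrest : rest <:+ K := (List.suffix_cons c rest).trans hsuf
    cases hget : m.get? (rest.length + 1, pos) with
    | some v =>
      have hD : bDp n positions (c :: rest) pos m = (v, m) := by rw [bDp, hget]
      rw [hD]
      obtain ⟨s', hs', hlen, hv⟩ := hm _ _ hget
      have hse : s' = c :: rest := pv_suffix_eq_of_length hs' hsuf (by simpa using hlen)
      subst hse
      exact ⟨hv, hm⟩
    | none =>
      have hD : bDp n positions (c :: rest) pos m
          = ((bLoop n positions rest pos (positions.getD c []) (10 ^ 18) m).1,
             (bLoop n positions rest pos (positions.getD c []) (10 ^ 18) m).2.insert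
               (rest.length + 1, pos)
               (bLoop n positions rest pos (positions.getD c []) (10 ^ 18) m).1) := by
        rw [bDp, hget]
      rw [hD]
      obtain ⟨l1, l2⟩ := pv_bLoop_spec n positions K rest (fun p mm hmm => ih hrest p mm hmm)
        (positions.getD c []) pos (10 ^ 18) m hm
      constructor
      · rw [l1]
        rfl
      · intro a v hget'
        rw [PySem.Dict.get?_insert] at hget'
        by_cases ha : a = (rest.length + 1, pos)
        · rw [if_pos ha] at hget'
          refine ⟨c :: rest, hsuf, by simp [ha], ?_⟩
          cases hget'
          rw [l1]
          rw [ha]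
          rfl
        · rw [if_neg ha] at hget'
          exact l2 a v hget'

theorem pv_solveB_eq (ring key : String) :
    solve_alt ring key
      = pvF (PySem.Str.len ring) (pvP ring) key.toList 0 + PySem.Str.len key := by
  have hshape : solve_alt ring key
      = (bDp (PySem.Str.len ring) (pvIdx ring) key.toList 0 PySem.Dict.empty).1
          + PySem.Str.len key := rfl
  have hvalid : pvValid (PySem.Str.len ring) (fun c => (pvIdx ring).getD c []) key.toList
      PySem.Dict.empty := by
    intro a v hget
    rw [PySem.Dict.get?_empty] at hget
    exact absurd hget (by simp)
  have := pv_bDp_spec (PySem.Str.len ring) (pvIdx ring) key.toList key.toList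
    (List.suffix_refl _) 0 PySem.Dict.empty hvalid
  rw [hshape, this.1]
  rfl

-- ===== VERDICT (by name: the statement is the Claim_ definition above) =====
theorem solve_spec : Claim_equal_solve := by
  intro ring key _ hpre
  have hpre' : ∀ c ∈ key.toList, c ∈ ring.toList := by
    intro c hc
    have := List.all_eq_true.mp hpre c hc
    simpa using this
  show solve ring key = solve_alt ring key
  rw [pv_solveA_eq ring key hpre', pv_solveB_eq]
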